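-- pv_equiv track=rewrite | github.com/YuhangSong/mini-radas | radas/utils.py | reorder_list_with_scores
-- ===== SOURCE A (Python) =====
-- def assert_msg(x, expect_type):
--     return f"{x} is not a {expect_type}, but a {type(x)}"
--
-- def assert_type(x, expect_type):
--     assert isinstance(x, expect_type), assert_msg(x, expect_type)
--
-- def assert_number(x):
--     assert_type(x, (int, float))
--
-- def assert_list(x):
--     assert_type(x, list)
--
-- def reorder_list_with_scores(x, scores):
--     r"""
--     Reorder the list x according to the scores provided. (Not in-place)
--
--     Args:
--         x: List of elements to be reordered.
--         scores: List of scores based on which the reordering should be done.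
--
--     Returns:
--         List: The reordered list.
--
--     Examples::
--         >>> reorder_list_with_scores(['a', 'b', 'c'], [3, 1, 2])
--         ['b', 'c', 'a']
--     """
--
--     assert_list(x)
--     x = x.copy()
--     assert_list(scores)
--     for score in scores:
--         assert_number(score)
--     assert len(x) == len(scores)
--
--     # pair each element with its score, sort by score, then extract the elements in the new order
--     paired = list(zip(x, scores))
--     sorted_pairs = sorted(paired, key=lambda pair: pair[1])
--     reordered = [element for element, score in sorted_pairs]
--
--     return reordered
-- ===== SOURCE B (Python) =====
-- def assert_msg(x, expect_type):
--     return f"{x} is not a {expect_type}, but a {type(x)}"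
--
-- def assert_type(x, expect_type):
--     assert isinstance(x, expect_type), assert_msg(x, expect_type)
--
-- def assert_number(x):
--     assert_type(x, (int, float))
--
-- def assert_list(x):
--     assert_type(x, list)
--
-- def reorder_list_with_scores(x, scores):
--     assert_list(x)
--     x = x.copy()
--     assert_list(scores)
--     for score in scores:
--         assert_number(score)
--     assert len(x) == len(scores)
--     # selection by repeated extraction: pull out the first occurrence of the
--     # minimal remaining score each round (first occurrence => stable order)
--     keys = scores.copy()
--     out = []
--     while keys:
--         j = keys.index(min(keys))
--         out.append(x.pop(j))
--         keys.pop(j)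
--     return out
-- ===== Notes on version B (the rewrite author's own statement) =====
-- stated objective: alternative
-- what changed: B replaces the pair-zip-and-library-sort with a selection sort: it repeatedly finds the first occurrence of the minimal remaining score, pops that element from both parallel lists and appends it to the output; extracting the first minimum reproduces the stable order exactly.
import Mathlib
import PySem

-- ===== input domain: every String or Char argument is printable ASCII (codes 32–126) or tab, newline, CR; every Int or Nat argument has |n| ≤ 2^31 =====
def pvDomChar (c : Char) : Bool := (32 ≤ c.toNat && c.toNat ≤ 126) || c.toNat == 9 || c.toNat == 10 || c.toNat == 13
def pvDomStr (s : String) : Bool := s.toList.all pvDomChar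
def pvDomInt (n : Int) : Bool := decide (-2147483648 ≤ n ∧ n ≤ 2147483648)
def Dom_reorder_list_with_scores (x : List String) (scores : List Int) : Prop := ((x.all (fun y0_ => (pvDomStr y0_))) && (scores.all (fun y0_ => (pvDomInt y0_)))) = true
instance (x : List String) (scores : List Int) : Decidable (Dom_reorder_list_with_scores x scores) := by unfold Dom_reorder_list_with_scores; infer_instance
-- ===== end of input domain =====

-- B replaces the zip-and-library-sort of A by a selection sort: repeatedly extract the
-- first occurrence of the minimal remaining score (alternative algorithm; no speed claim).

-- ===== PORT A =====
-- paired = list(zip(x, scores)); sorted_pairs = sorted(paired, key=lambda pair: pair[1]);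
-- reordered = [element for element, score in sorted_pairs]
def reorder_list_with_scores (x : List String) (scores : List Int) : List String :=
  let paired := x.zip scores
  let sorted_pairs := PySem.List.sorted paired (fun pair => pair.2) false
  sorted_pairs.map (fun p => p.1)

-- ===== PORT B =====
-- the while loop: while keys: j = keys.index(min(keys)); out.append(x.pop(j)); keys.pop(j)
-- (keys nonempty makes min/index succeed, so the .getD defaults are never used; the
--  pop? none branch is unreachable when len(x) == len(keys), which Pre_ guarantees)
def selPick (x : List String) (keys : List Int) : List String :=
  match keys with
  | [] => []
  | k :: kt =>
      let m := (PySem.List.min? (k :: kt) (fun v => v)).getD k      -- min(keys)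
      let j := (PySem.List.index? (k :: kt) m).getD 0               -- keys.index(min(keys))
      match PySem.List.pop? x (j : Int) with                        -- x.pop(j)
      | none => []
      | some (e, x') =>
          e :: selPick x' (((PySem.List.pop? (k :: kt) (j : Int)).map (fun r => r.2)).getD kt)  -- keys.pop(j)
termination_by keys.length
decreasing_by
  rcases h : PySem.List.pop? (k :: kt) (j : Int) with _ | r
  · simp
  · have := PySem.List.length_of_pop?_eq_some _ h
    simp_all

def reorder_list_with_scores_alt (x : List String) (scores : List Int) : List String :=
  selPick x scores

-- ===== PRECONDITION & SPEC =====
-- Pre_ excludes only length mismatch, where A's `assert len(x) == len(scores)` raises AssertionError.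
def Pre_reorder_list_with_scores (x : List String) (scores : List Int) : Prop :=
  x.length = scores.length
instance (x : List String) (scores : List Int) : Decidable (Pre_reorder_list_with_scores x scores) := by
  unfold Pre_reorder_list_with_scores; infer_instance

def pvWitness_reorder_list_with_scores : List String × List Int := (["a", "b", "c"], [3, 1, 2])

def Spec_reorder_list_with_scores (x : List String) (scores : List Int) (out : List String) : Prop := out = reorder_list_with_scores_alt x scores
instance (x : List String) (scores : List Int) (out : List String) : Decidable (Spec_reorder_list_with_scores x scores out) := by unfold Spec_reorder_list_with_scores; infer_instance

-- ===== CLAIM (what is proved, stated in full; the proofs are below) =====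
def Claim_equal_reorder_list_with_scores : Prop := ∀ (x : List String) (scores : List Int), Dom_reorder_list_with_scores x scores → Pre_reorder_list_with_scores x scores → Spec_reorder_list_with_scores x scores (reorder_list_with_scores x scores)

-- ===== LEMMAS AND PROOFS =====

-- abbreviations for A's stable insertion step (strict compare) and the "insert before
-- first ≥" step used to analyse it
def insLt (z : String × Int) (L : List (String × Int)) : List (String × Int) :=
  PySem.List.insertBy (fun p q => decide (p.2 < q.2)) z L
def insLe (a : String × Int) (L : List (String × Int)) : List (String × Int) :=
  PySem.List.insertBy (fun p q => decide (p.2 ≤ q.2)) a L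

-- one insertion commutes with the ≤-insertion (pure case analysis, no ordering hypotheses)
theorem insLt_insLe_comm (L : List (String × Int)) (a z : String × Int) :
    insLt z (insLe a L) = insLe a (insLt z L) := by
  induction L with
  | nil =>
    simp only [insLt, insLe, PySem.List.insertBy]
    split_ifs with h1 h2 h2 <;> simp_all <;> omega
  | cons y t ih =>
    simp only [insLt, insLe, PySem.List.insertBy] at *
    by_cases hay : a.2 ≤ y.2
    · by_cases hza : z.2 < a.2
      · have hzy : z.2 < y.2 := by omega
        have haz : ¬ a.2 ≤ z.2 := by omega
        simp [hay, hza, hzy, haz, PySem.List.insertBy]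
      · have haz : a.2 ≤ z.2 := by omega
        by_cases hzy : z.2 < y.2 <;> simp [hay, hza, haz, hzy, PySem.List.insertBy]
    · have hya : y.2 < a.2 := by omega
      by_cases hzy : z.2 < y.2
      · have hza : ¬ z.2 < a.2 → z.2 < a.2 := by omega
        have haz : ¬ a.2 ≤ z.2 := by omega
        simp [hay, hzy, haz, PySem.List.insertBy]
      · simp [hay, hzy, PySem.List.insertBy, ih]

-- folding A's insertion over t commutes with a pending ≤-insertion
theorem foldl_insLt_insLe (t : List (String × Int)) (a : String × Int) :
    ∀ acc, t.foldl (fun acc x => insLt x acc) (insLe a acc)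
      = insLe a (t.foldl (fun acc x => insLt x acc) acc) := by
  induction t with
  | nil => intro acc; rfl
  | cons z t ih =>
    intro acc
    simp only [List.foldl_cons, insLt_insLe_comm]
    exact ih _

-- A's stable sort peels its first element off as a ≤-insertion into the sorted tail
theorem sorted_cons_eq_insLe (a : String × Int) (t : List (String × Int)) :
    PySem.List.sorted (a :: t) (fun p => p.2) false
      = insLe a (PySem.List.sorted t (fun p => p.2) false) := by
  rw [PySem.List.sorted_eq_foldl_insertBy, PySem.List.sorted_eq_foldl_insertBy]
  have h0 : insLe a ([] : List (String × Int)) = [a] := rfl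
  calc (a :: t).foldl (fun acc x => PySem.List.insertBy (fun p q => decide (p.2 < q.2)) x acc) []
      = t.foldl (fun acc x => insLt x acc) (insLe a []) := by
        simp [List.foldl_cons, h0, insLt, PySem.List.insertBy]
    _ = insLe a (t.foldl (fun acc x => insLt x acc) []) := foldl_insLt_insLe t a []
    _ = insLe a (t.foldl (fun acc x => PySem.List.insertBy (fun p q => decide (p.2 < q.2)) x acc) []) := rfl

-- head extraction: sorting P ++ (e, m) :: S where m is strictly below every score in P
-- and at most every score in S puts (e, m) first, followed by the sort of the rest
theorem sorted_extract_first_min (e : String) (m : Int) :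
    ∀ (P S : List (String × Int)),
      (∀ p ∈ P, m < p.2) → (∀ s ∈ S, m ≤ s.2) →
      PySem.List.sorted (P ++ (e, m) :: S) (fun p => p.2) false
        = (e, m) :: PySem.List.sorted (P ++ S) (fun p => p.2) false := by
  intro P
  induction P with
  | nil =>
    intro S _ hS
    rw [List.nil_append, List.nil_append, sorted_cons_eq_insLe]
    rcases h : PySem.List.sorted S (fun p => p.2) false with _ | ⟨y, ys⟩
    · rfl
    · have hy : y ∈ S := by
        rw [← PySem.List.mem_sorted S (fun p => p.2) false]; simp [h]
      have : m ≤ y.2 := hS y hy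
      simp [insLe, PySem.List.insertBy, this]
  | cons a P ih =>
    intro S hP hS
    have ha : m < a.2 := hP a (by simp)
    rw [List.cons_append, sorted_cons_eq_insLe,
        ih S (fun p hp => hP p (by simp [hp])) hS]
    have hna : ¬ a.2 ≤ m := by omega
    rw [List.cons_append, sorted_cons_eq_insLe]
    simp [insLe, PySem.List.insertBy, hna]

-- ===== main equivalence =====

theorem selPick_eq_sorted :
    ∀ (n : Nat) (x : List String) (scores : List Int), scores.length = n →
      x.length = scores.length →
      (PySem.List.sorted (x.zip scores) (fun p => p.2) false).map (fun p => p.1)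
        = selPick x scores := by
  intro n
  induction n with
  | zero =>
    intro x scores hn hlen
    have h1 : scores = [] := List.length_eq_zero_iff.mp hn
    subst h1
    have h2 : x = [] := List.length_eq_zero_iff.mp hlen
    subst h2
    simp [selPick, PySem.List.sorted_eq_foldl_insertBy]
  | succ n ih =>
    intro x scores hn hlen
    rcases scores with _ | ⟨k, kt⟩
    · simp at hn
    -- the minimum value m and its properties
    rcases hmin : PySem.List.min? (k :: kt) (fun v => v) with _ | m
    · exact absurd ((PySem.List.min?_eq_none_iff _ _).mp hmin) (by simp)
    have hmMem : m ∈ k :: kt := PySem.List.min?_mem hmin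
    have hmMin : ∀ y ∈ k :: kt, m ≤ y := PySem.List.min?_isMin hmin
    -- the index j of the first occurrence of m
    rcases hidx : PySem.List.index? (k :: kt) m with _ | j
    · exact absurd ((PySem.List.index?_eq_none_iff _ _).mp hidx) (by simp [hmMem])
    obtain ⟨pre, suf, hsplit, hplen, hmpre⟩ := (PySem.List.index?_eq_some_iff _ _ _).mp hidx
    have hpre : ∀ p ∈ pre, m < p := by
      intro p hp
      have h1 : m ≤ p := hmMin p (by rw [hsplit]; exact List.mem_append_left _ hp)
      rcases lt_or_eq_of_le h1 with h | h
      · exact h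
      · exact absurd (h ▸ hp) hmpre
    have hsuf : ∀ s ∈ suf, m ≤ s := fun s hs =>
      hmMin s (by rw [hsplit]; exact List.mem_append_right _ (by simp [hs]))
    -- j is in range of both lists
    have hj : j < (k :: kt).length := by
      have h1 : (k :: kt).length = pre.length + suf.length + 1 := by rw [hsplit]; simp; try omega
      omega
    have hjx : j < x.length := by omega
    -- splits of x and the keys at index j
    have hxsplit : x = x.take j ++ x[j] :: x.drop (j + 1) := by
      conv_lhs => rw [← List.take_append_drop j x]
      rw [List.drop_eq_getElem_cons hjx]
    have htlen : (x.take j).length = pre.length := by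
      rw [List.length_take, hplen]; omega
    -- the zip decomposes around position j
    have hzip : x.zip (k :: kt)
        = (x.take j).zip pre ++ (x[j], m) :: (x.drop (j + 1)).zip suf := by
      conv_lhs => rw [hxsplit, hsplit]
      rw [List.zip_append htlen]; rfl
    -- the erased lists zip to the remaining pairs
    have hkeyerase : (k :: kt).eraseIdx j = pre ++ suf := by
      rw [hsplit, List.eraseIdx_append_of_length_le (by omega)]
      simp [hplen]
    have hzip' : (x.eraseIdx j).zip ((k :: kt).eraseIdx j)
        = (x.take j).zip pre ++ (x.drop (j + 1)).zip suf := by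
      rw [hkeyerase, List.eraseIdx_eq_take_drop_succ, List.zip_append htlen]
    -- pop? succeeds on both lists
    have hpopx : PySem.List.pop? x (j : Int) = some (x[j], x.eraseIdx j) :=
      PySem.List.pop?_natCast x j hjx
    have hpopk : PySem.List.pop? (k :: kt) (j : Int)
        = some ((k :: kt)[j], (k :: kt).eraseIdx j) :=
      PySem.List.pop?_natCast (k :: kt) j hj
    -- one step of B's loop
    have hsel : selPick x (k :: kt)
        = x[j] :: selPick (x.eraseIdx j) ((k :: kt).eraseIdx j) := by
      rw [selPick]
      simp only [hmin, Option.getD_some, hidx, hpopx, hpopk, Option.map_some, Option.getD_some]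
    -- lengths for the induction hypothesis
    have hlen1 : ((k :: kt).eraseIdx j).length = n := by
      rw [List.length_eraseIdx, if_pos hj]; omega
    have hlen2 : (x.eraseIdx j).length = ((k :: kt).eraseIdx j).length := by
      rw [List.length_eraseIdx, List.length_eraseIdx, if_pos hj, if_pos hjx]; omega
    -- put it together via head extraction of the stable sort
    rw [hsel, hzip,
      sorted_extract_first_min x[j] m ((x.take j).zip pre) ((x.drop (j + 1)).zip suf)
        (fun p hp => hpre p.2 (List.of_mem_zip (by rwa [← Prod.mk.eta (p := p)] at hp)).2)
        (fun s hs => hsuf s.2 (List.of_mem_zip (by rwa [← Prod.mk.eta (p := s)] at hs)).2),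
      List.map_cons, ← hzip', ih _ _ hlen1 hlen2]

theorem reorder_list_with_scores_spec : Claim_equal_reorder_list_with_scores := by
  intro x scores _ hpre
  unfold Spec_reorder_list_with_scores reorder_list_with_scores reorder_list_with_scores_alt
  exact selPick_eq_sorted scores.length x scores rfl hpre
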